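-- pv_equiv track=rewrite | github.com/Lioncat2002/CSE-programs | python_programs/functions/recursion/checkaa_bb.py | check
-- ===== SOURCE A (Python) =====
-- def check(string):
--     if len(string)==0:
--         return True
--     elif len(string)==1:
--         if string[0]=='a':
--             return True
--     elif string[0]=='b':
--         if string[1]=='b':
--             return check(string[2:])
--     elif string[0]=='a':
--         return check(string[1:])
--     return False
-- ===== SOURCE B (Python) =====
-- def check(string):
--     n = len(string)
--     i = 0
--     while i < n:
--         c = string[i]
--         if c == 'a':
--             i += 1
--         elif c == 'b' and i + 1 < n and string[i + 1] == 'b':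
--             i += 2
--         else:
--             return False
--     return True
-- ===== Notes on version B (the rewrite author's own statement) =====
-- stated objective: faster
-- what changed: Replaced the recursion that slices a fresh substring at every step with a single index-based while loop over the original string.
import Mathlib
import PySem

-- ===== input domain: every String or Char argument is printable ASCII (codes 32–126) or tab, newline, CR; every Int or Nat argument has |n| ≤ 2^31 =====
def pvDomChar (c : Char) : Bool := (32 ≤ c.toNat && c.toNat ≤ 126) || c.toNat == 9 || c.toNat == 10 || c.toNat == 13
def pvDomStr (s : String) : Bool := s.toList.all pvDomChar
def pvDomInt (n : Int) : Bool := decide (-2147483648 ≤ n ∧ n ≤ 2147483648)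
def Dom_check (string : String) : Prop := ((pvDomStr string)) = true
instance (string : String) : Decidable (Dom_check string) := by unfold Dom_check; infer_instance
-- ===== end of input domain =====

-- B replaces A's recursive slicing (which copies a fresh substring per step) with a single index-based pass; no copies, one scan.


-- ===== PORT A =====
-- A recurses on the string, slicing off the matched prefix ([2:] / [1:]); on List Char
-- the slice string[2:] is exactly the tail `rest`, and string[1:] is `c1 :: rest`.
def checkRecA : List Char → Bool
  | [] => true
  | [c] => if c = 'a' then true else false
  | c0 :: c1 :: rest =>
    if c0 = 'b' then
      (if c1 = 'b' then checkRecA rest else false)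
    else if c0 = 'a' then
      checkRecA (c1 :: rest)
    else false

def check (string : String) : Bool := checkRecA string.toList

-- ===== PORT B =====
-- B's while loop over an index i, c = string[i] fetched with getD (always in range when i < n).
def checkGoB (s : List Char) (n i : Nat) : Bool :=
  if i < n then
    (let c := s.getD i ' '
     if c = 'a' then checkGoB s n (i + 1)
     else if c = 'b' && decide (i + 1 < n) && (s.getD (i + 1) ' ' = 'b') then checkGoB s n (i + 2)
     else false)
  else true
  termination_by n - i

def check_alt (string : String) : Bool := checkGoB string.toList string.toList.length 0

-- ===== PRECONDITION & SPEC =====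
def Spec_check (string : String) (out : Bool) : Prop := out = check_alt string
instance (string : String) (out : Bool) : Decidable (Spec_check string out) := by unfold Spec_check; infer_instance

-- ===== CLAIM (what is proved, stated in full; the proofs are below) =====
def Claim_equal_check : Prop := ∀ (string : String), Dom_check string → Spec_check string (check string)

-- ===== LEMMAS AND PROOFS =====
theorem checkGoB_eq_drop (s : List Char) (i : Nat) :
    checkGoB s s.length i = checkRecA (s.drop i) := by
  by_cases h : i < s.length
  · have hc : s[i]? = some s[i] := List.getElem?_eq_getElem h
    have hdrop : s.drop i = s[i] :: s.drop (i + 1) := List.drop_eq_getElem_cons h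
    rw [checkGoB]
    simp only [h, if_true, List.getD_eq_getElem?_getD, hc, Option.getD_some]
    by_cases ha : s[i] = 'a'
    · rw [if_pos ha, checkGoB_eq_drop s (i + 1), hdrop, ha]
      cases hrest : s.drop (i + 1) with
      | nil => simp [checkRecA]
      | cons c1 rest => simp [checkRecA]
    · rw [if_neg ha]
      by_cases hb : s[i] = 'b'
      · by_cases h1 : i + 1 < s.length
        · have hc1 : s[i+1]? = some s[i+1] := List.getElem?_eq_getElem h1
          have hdrop1 : s.drop (i + 1) = s[i+1] :: s.drop (i + 2) := List.drop_eq_getElem_cons h1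
          rw [hdrop, hdrop1, hb]
          by_cases hb2 : s[i+1] = 'b'
          · rw [checkGoB_eq_drop s (i + 2)]
            simp [checkRecA, hb2, h1]
          · simp [checkRecA, hb2, h1]
        · have hnil : s.drop (i + 1) = [] := List.drop_eq_nil_of_le (by omega)
          rw [hdrop, hnil, hb]
          simp [checkRecA, h1]
      · rw [hdrop]
        cases hrest : s.drop (i + 1) with
        | nil => simp [checkRecA, ha, hb]
        | cons c1 rest => simp [checkRecA, ha, hb]
  · have hnil : s.drop i = [] := List.drop_eq_nil_of_le (by omega)
    rw [checkGoB]
    simp [h, hnil, checkRecA]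
  termination_by s.length - i

-- ===== VERDICT (by name: the statement is the Claim_ definition above) =====
theorem check_spec : Claim_equal_check := by
  intro string _
  unfold Spec_check check check_alt
  rw [checkGoB_eq_drop]
  simp
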